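-- pv_equiv track=rewrite | github.com/HwiNyeonKim/algorithm-2025 | programmers/programmers_code_challenge_2025/서버_증설_횟수.py | solution
-- ===== SOURCE A (Python) =====
-- import math
--
-- def solution(players, m, k):
--     total_scale_out_count = 0
--     # 0시-1시 부터 23시-24시까지 동작중인 서버의 수. 기본적으로 1개는 항상 동작중이다.
--     servers = [1 for _ in range(24)]
--
--     for time, player in enumerate(players):
--         user_capacity = servers[time] * m - 1
--         required_servers = max(math.ceil((player - user_capacity) / m), 0)
--
--         for i in range(time, min(time + k, 24)):
--             servers[i] += required_servers
--
--         total_scale_out_count += required_servers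
--
--     return total_scale_out_count
-- ===== SOURCE B (Python) =====
-- def solution(players, m, k):
--     # Sliding-window pass: keep the scale-out amounts that are still active
--     # (at most the last k-1 of them) and their running sum, instead of a
--     # 24-slot server array with an inner range-update loop.
--     total = 0
--     window = []   # still-active scale-out amounts, oldest first
--     wsum = 0      # == sum(window)
--     for player in players:
--         capacity = (1 + wsum) * m - 1
--         required = max(-((capacity - player) // m), 0)  # == ceil((player-capacity)/m)
--         total += required
--         window.append(required)
--         wsum += required
--         if len(window) >= k:
--             wsum -= window.pop(0)
--     return total
-- ===== Notes on version B (the rewrite author's own statement) =====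
-- stated objective: alternative
-- what changed: B replaces A's 24-slot server array with its per-hour inner range-update loop by a single sliding-window pass that keeps only the still-active scale-out amounts and their running sum, and uses exact integer ceiling division instead of float math.ceil.
import Mathlib
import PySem

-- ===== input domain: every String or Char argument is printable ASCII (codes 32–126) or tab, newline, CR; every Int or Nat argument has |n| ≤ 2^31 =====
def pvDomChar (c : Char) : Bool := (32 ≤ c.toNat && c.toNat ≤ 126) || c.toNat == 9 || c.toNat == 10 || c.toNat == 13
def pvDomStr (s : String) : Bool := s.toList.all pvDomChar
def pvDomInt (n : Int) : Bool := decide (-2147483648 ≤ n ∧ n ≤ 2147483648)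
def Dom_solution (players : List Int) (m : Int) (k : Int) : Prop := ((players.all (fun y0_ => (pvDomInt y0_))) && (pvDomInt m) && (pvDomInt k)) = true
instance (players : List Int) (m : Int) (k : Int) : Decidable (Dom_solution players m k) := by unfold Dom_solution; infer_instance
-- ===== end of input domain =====

-- B replaces A's 24-slot server array and inner range-update loop by a sliding-window
-- pass over the still-active scale-out amounts (objective: alternative decomposition).

-- Hand port of Python's math.ceil(a / b) on integer arguments: exact integer ceiling
-- division.  On every input admitted by Dom_solution ∧ Pre_solution the quantities fed to
-- math.ceil are small enough that the float division rounds to the same ceiling.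
def pyCeilDiv (a b : Int) : Int := -(PySem.Int.floordiv (-a) b)

-- ===== PORT A =====
-- state: remaining players, current hour `time`, running total, 24-slot server list.
-- `servers[time]` raises IndexError in Python when time ≥ 24 (Pre_ excludes that);
-- the indices written by the inner loop are always in range there.
def solutionGoA (m k : Int) : List Int → Nat → Int → List Int → Int
  | [], _, total, _ => total
  | player :: rest, time, total, servers =>
    let userCapacity := PySem.List.pyGetD servers (time : Int) 0 * m - 1
    let requiredServers := max (pyCeilDiv (player - userCapacity) m) 0
    let servers' := (PySem.List.pyRange (time : Int) (min ((time : Int) + k) 24) 1).foldl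
        (fun sv i => sv.set i.toNat (sv.getD i.toNat 0 + requiredServers)) servers
    solutionGoA m k rest (time + 1) (total + requiredServers) servers'

def solution (players : List Int) (m : Int) (k : Int) : Int :=
  solutionGoA m k players 0 0 (List.replicate 24 1)

-- ===== PORT B =====
-- state: remaining players, running total, window of still-active scale-out amounts
-- (oldest first), and its running sum; `window.pop(0)` on the non-empty appended list
-- is ported as headD/drop 1.
def solutionGoB (m k : Int) : List Int → Int → List Int → Int → Int
  | [], total, _, _ => total
  | player :: rest, total, window, wsum =>
    let capacity := (1 + wsum) * m - 1
    let required := max (-(PySem.Int.floordiv (capacity - player) m)) 0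
    let window' := window ++ [required]
    if k ≤ (window'.length : Int) then
      solutionGoB m k rest (total + required) (window'.drop 1) (wsum + required - window'.headD 0)
    else
      solutionGoB m k rest (total + required) window' (wsum + required)

def solution_alt (players : List Int) (m : Int) (k : Int) : Int :=
  solutionGoB m k players 0 [] 0

-- ===== PRECONDITION & SPEC =====
-- Pre_ excludes exactly the inputs on which Python A raises: more than 24 players
-- (IndexError at hour 24) and m = 0 with a non-empty player list (ZeroDivisionError).
def Pre_solution (players : List Int) (m : Int) (k : Int) : Prop :=
  players.length ≤ 24 ∧ (m ≠ 0 ∨ players = [])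
instance (players : List Int) (m : Int) (k : Int) : Decidable (Pre_solution players m k) := by
  unfold Pre_solution; infer_instance

def pvWitness_solution : List Int × Int × Int := ([10, 23, 2], 5, 2)

def Spec_solution (players : List Int) (m : Int) (k : Int) (out : Int) : Prop := out = solution_alt players m k
instance (players : List Int) (m : Int) (k : Int) (out : Int) : Decidable (Spec_solution players m k out) := by unfold Spec_solution; infer_instance

-- ===== CLAIM (what is proved, stated in full; the proofs are below) =====
def Claim_equal_solution : Prop := ∀ (players : List Int) (m : Int) (k : Int), Dom_solution players m k → Pre_solution players m k → Spec_solution players m k (solution players m k)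


-- ===== LEMMAS AND PROOFS =====

-- A's inner loop preserves the length of the server list.
lemma length_foldl_set (req : Int) (r : List Int) (servers : List Int) :
    (r.foldl (fun sv i => sv.set i.toNat (sv.getD i.toNat 0 + req)) servers).length
      = servers.length := by
  induction r generalizing servers with
  | nil => rfl
  | cons a r ih => rw [List.foldl_cons, ih, List.length_set]

-- Effect of A's inner range-update loop on one slot.
lemma inner_getD (req : Int) (i : Nat) :
    ∀ (n : Nat) (a b : Int) (servers : List Int), (b - a).toNat = n → 0 ≤ a →
      b ≤ (servers.length : Int) →
      ((PySem.List.pyRange a b 1).foldl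
          (fun sv j => sv.set j.toNat (sv.getD j.toNat 0 + req)) servers).getD i 0
        = servers.getD i 0 + (if a ≤ (i : Int) ∧ (i : Int) < b then req else 0) := by
  intro n
  induction n with
  | zero =>
    intro a b servers hn _ _
    rw [PySem.List.pyRange_one_eq_nil (by omega)]
    simp only [List.foldl_nil]
    rw [if_neg (by omega)]
    omega
  | succ n ih =>
    intro a b servers hn ha hb
    have hab : a < b := by omega
    rw [PySem.List.pyRange_one_cons hab, List.foldl_cons]
    have hlen : (servers.set a.toNat (servers.getD a.toNat 0 + req)).length = servers.length := by
      simp [List.length_set]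
    rw [ih (a + 1) b _ (by omega) (by omega) (by rw [hlen]; exact hb)]
    by_cases hia : i = a.toNat
    · have hia' : (i : Int) = a := by omega
      have hlt : a.toNat < servers.length := by omega
      rw [hia, List.getD_eq_getElem?_getD, List.getElem?_set_self (by omega),
        Option.getD_some, if_neg (by omega), if_pos (by omega)]
      ring
    · rw [List.getD_eq_getElem?_getD, List.getElem?_set_ne (by omega),
        ← List.getD_eq_getElem?_getD]
      have : (a ≤ (i : Int) ∧ (i : Int) < b) ↔ (a + 1 ≤ (i : Int) ∧ (i : Int) < b) := by omega
      rw [if_congr this rfl rfl]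

-- Sum of a dropped suffix after appending one element.
lemma drop_append_sum (w : List Int) (x : Int) (d : Nat) :
    ((w ++ [x]).drop d).sum = (w.drop d).sum + (if d ≤ w.length then x else 0) := by
  by_cases h : d ≤ w.length
  · rw [List.drop_append_of_le_length h, List.sum_append, if_pos h]
    simp
  · rw [List.drop_eq_nil_of_le (show (w ++ [x]).length ≤ d by simp; omega),
      List.drop_eq_nil_of_le (show w.length ≤ d by omega), if_neg h]
    simp

-- Main invariant lemma, k ≥ 1: the 24-slot server array of A and the sliding window
-- of B present the same current capacity at every hour.
lemma goEq_pos (m k : Int) (hk : 1 ≤ k) :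
    ∀ (rest : List Int) (time : Nat) (total : Int) (servers window : List Int) (wsum : Int),
      time + rest.length ≤ 24 →
      servers.length = 24 →
      (window.length : Int) < k →
      wsum = window.sum →
      (∀ i : Nat, time ≤ i → i < 24 →
        servers.getD i 0
          = 1 + (window.drop (((i : Int) + 1 + window.length - time - k).toNat)).sum) →
      solutionGoA m k rest time total servers = solutionGoB m k rest total window wsum
  | [], _, _, _, _, _, _, _, _, _, _ => by simp [solutionGoA, solutionGoB]
  | p :: rest, time, total, servers, window, wsum, hlen, h24, hwk, hsum, hinv => by
    have ht24 : time < 24 := by simp at hlen; omega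
    have hts : servers.getD time 0 = 1 + window.sum := by
      have h := hinv time le_rfl ht24
      have h0 : (((time : Int) + 1 + window.length - time - k).toNat) = 0 := by omega
      rw [h0, List.drop_zero] at h
      exact h
    have hcap : PySem.List.pyGetD servers (time : Int) 0 = 1 + wsum := by
      rw [PySem.List.pyGetD_natCast, hts, hsum]
    simp only [solutionGoA, solutionGoB, hcap]
    have harg : -(p - ((1 + wsum) * m - 1)) = (1 + wsum) * m - 1 - p := by ring
    simp only [pyCeilDiv, harg]
    set req := max (-(PySem.Int.floordiv ((1 + wsum) * m - 1 - p) m)) 0 with hreq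
    -- the updated server list
    set servers' := (PySem.List.pyRange (time : Int) (min ((time : Int) + k) 24) 1).foldl
        (fun sv i => sv.set i.toNat (sv.getD i.toNat 0 + req)) servers with hs'
    have hlen' : servers'.length = 24 := by rw [hs', length_foldl_set, h24]
    have hget : ∀ i : Nat, time + 1 ≤ i → i < 24 →
        servers'.getD i 0 = servers.getD i 0 + (if (i : Int) < (time : Int) + k then req else 0) := by
      intro i hi1 hi2
      rw [hs', inner_getD req i ((min ((time : Int) + k) 24) - time).toNat (time : Int) _ servers
        rfl (by omega) (by rw [h24]; omega)]
      have hc : ((time : Int) ≤ (i : Int) ∧ (i : Int) < min ((time : Int) + k) 24)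
          ↔ ((i : Int) < (time : Int) + k) := by omega
      rw [if_congr hc rfl rfl]
    by_cases hpop : k ≤ ((window ++ [req]).length : Int)
    · -- pop branch: the window is full, k = window.length + 1
      have hkw : k = (window.length : Int) + 1 := by simp at hpop; omega
      rw [if_pos hpop]
      apply goEq_pos m k hk rest (time + 1) (total + req) servers'
        ((window ++ [req]).drop 1) _ (by simp at hlen; omega) hlen'
      · simp; omega
      · -- new wsum = sum of new window
        cases window with
        | nil =>
          simp only [List.nil_append, List.headD_cons, List.drop_one, List.tail_cons,
            List.sum_nil, hsum]
          ring
        | cons h t =>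
          simp only [List.cons_append, List.headD_cons, List.drop_one, List.tail_cons,
            List.sum_append, List.sum_cons, List.sum_nil, hsum]
          ring
      · intro i hi1 hi2
        rw [hget i hi1 hi2, hinv i (by omega) hi2]
        have hL : ((window ++ [req]).drop 1).length = window.length := by simp
        rw [hL, List.drop_drop]
        have e : 1 + ((i : Int) + 1 + (window.length : Int) - ((time + 1 : Nat) : Int) - k).toNat
            = ((i : Int) + 1 + (window.length : Int) - (time : Int) - k).toNat := by
          push_cast; omega
        rw [e, drop_append_sum]
        by_cases hc : (i : Int) < (time : Int) + k
        · rw [if_pos hc, if_pos (by omega)]; ring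
        · rw [if_neg hc, if_neg (by omega)]; ring
    · -- no-pop branch: the new window keeps all elements
      rw [if_neg hpop]
      apply goEq_pos m k hk rest (time + 1) (total + req) servers'
        (window ++ [req]) _ (by simp at hlen; omega) hlen'
      · simp at hpop ⊢; omega
      · simp [hsum]
      · intro i hi1 hi2
        rw [hget i hi1 hi2, hinv i (by omega) hi2]
        have hL : (window ++ [req]).length = window.length + 1 := by simp
        rw [hL]
        have e : ((i : Int) + 1 + ((window.length + 1 : Nat) : Int) - ((time + 1 : Nat) : Int) - k).toNat
            = ((i : Int) + 1 + (window.length : Int) - (time : Int) - k).toNat := by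
          push_cast; omega
        rw [e, drop_append_sum]
        by_cases hc : (i : Int) < (time : Int) + k
        · rw [if_pos hc, if_pos (by omega)]; ring
        · rw [if_neg hc, if_neg (by omega)]; ring

-- k ≤ 0: A's inner range is empty (servers stay all 1) and B's window empties itself
-- every hour (running sum stays 0).
lemma goEq_nonpos (m k : Int) (hk : k ≤ 0) :
    ∀ (rest : List Int) (time : Nat) (total : Int),
      time + rest.length ≤ 24 →
      solutionGoA m k rest time total (List.replicate 24 1) = solutionGoB m k rest total [] 0
  | [], _, _, _ => by simp [solutionGoA, solutionGoB]
  | p :: rest, time, total, hlen => by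
    have ht24 : time < 24 := by simp at hlen; omega
    have hr : PySem.List.pyRange (time : Int) (min ((time : Int) + k) 24) 1 = [] :=
      PySem.List.pyRange_one_eq_nil (by omega)
    have hg : PySem.List.pyGetD (List.replicate 24 (1 : Int)) (time : Int) 0 = 1 := by
      rw [PySem.List.pyGetD_natCast, List.getD_eq_getElem?_getD, List.getElem?_replicate]
      simp [ht24]
    simp only [solutionGoA, solutionGoB, hr, hg, List.foldl_nil]
    have harg : -(p - (1 * m - 1)) = (1 + 0) * m - 1 - p := by ring
    simp only [pyCeilDiv, harg]
    set req := max (-(PySem.Int.floordiv ((1 + 0) * m - 1 - p) m)) 0 with hreq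
    rw [if_pos (by simp; omega)]
    simp only [List.nil_append, List.headD_cons, List.drop_succ_cons, List.drop_zero]
    have : (0 : Int) + req - req = 0 := by ring
    rw [this]
    exact goEq_nonpos m k hk rest (time + 1) (total + req) (by simp at hlen; omega)

-- ===== VERDICT (by name: the statement is the Claim_ definition above) =====
theorem solution_spec : Claim_equal_solution := by
  intro players m k _ hpre
  unfold Spec_solution solution solution_alt
  obtain ⟨h24, _⟩ := hpre
  by_cases hk : k ≤ 0
  · exact goEq_nonpos m k hk players 0 0 (by simpa using h24)
  · refine goEq_pos m k (by omega) players 0 0 (List.replicate 24 1) [] 0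
      (by simpa using h24) (by simp) (by simp; omega) rfl ?_
    intro i _ hi
    rw [List.getD_eq_getElem?_getD, List.getElem?_replicate]
    simp [hi]
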